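-- pv_equiv track=rewrite | github.com/chrisgong5/USACO | USACO/2022_open/count_liar.py | check_liars
-- ===== SOURCE A (Python) =====
-- def check_liars(great_l, less_l, p):
--     m = len(great_l)
--     l = len(less_l)
--     i = 0
--     while i < l and p > less_l[i]:
--         i += 1
--     x = i
--     i = m - 1
--     while i >= 0 and p < great_l[i]:
--         i -= 1
--     x += m - i - 1
--     return x
-- ===== SOURCE B (Python) =====
-- def check_liars(great_l, less_l, p):
--     # full-pass reset-counter folds, traversing each list in the opposite
--     # direction from A, with no early exit and no index arithmetic:
--     # a run counter that resets on a failing element ends up holding the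
--     # length of the maximal prefix (resp. suffix) run.
--     below = 0
--     for v in reversed(less_l):
--         below = below + 1 if v < p else 0
--     above = 0
--     for v in great_l:
--         above = above + 1 if p < v else 0
--     return below + above
-- ===== Notes on version B (the rewrite author's own statement) =====
-- stated objective: alternative
-- what changed: replaces A's two early-exit index while-loops (forward over less_l, backward over great_l with m-i-1 arithmetic) by two full-pass reset-counter folds that traverse each list in the opposite direction; the counter resets on a failing element, so it ends holding the same prefix/suffix run length without indices or breaks
import Mathlib
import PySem

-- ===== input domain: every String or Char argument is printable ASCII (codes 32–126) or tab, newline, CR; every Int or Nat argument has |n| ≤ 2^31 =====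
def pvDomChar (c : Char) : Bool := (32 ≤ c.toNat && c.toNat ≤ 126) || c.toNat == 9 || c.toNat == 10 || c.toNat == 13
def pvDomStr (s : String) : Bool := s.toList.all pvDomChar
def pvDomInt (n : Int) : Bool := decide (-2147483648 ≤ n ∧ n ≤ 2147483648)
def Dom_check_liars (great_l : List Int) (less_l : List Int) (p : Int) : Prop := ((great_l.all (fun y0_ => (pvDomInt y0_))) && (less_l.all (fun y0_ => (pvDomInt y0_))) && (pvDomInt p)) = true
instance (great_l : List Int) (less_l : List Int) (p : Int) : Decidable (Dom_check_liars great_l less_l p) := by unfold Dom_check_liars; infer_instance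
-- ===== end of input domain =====

-- B replaces A's early-exit index while-loops by full-pass reset-counter folds traversing each list in the opposite direction (alternative decomposition, same cost).


-- ===== PORT A =====
-- forward scan `i = 0; while i < l and p > less_l[i]: i += 1` as structural recursion:
-- counts how many steps the loop takes before the condition fails
def pvScan (q : Int → Bool) : List Int → Nat
  | [] => 0
  | a :: t => if q a then pvScan q t + 1 else 0

def check_liars (great_l : List Int) (less_l : List Int) (p : Int) : Int :=
  -- x = i after the forward while-loop over less_l
  let x : Nat := pvScan (fun a => p > a) less_l
  -- the backward while-loop `i = m-1; while i >= 0 and p < great_l[i]: i -= 1` scans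
  -- great_l from its end, i.e. great_l.reverse from its front; `x += m - i - 1` adds
  -- the number of steps it took
  (x : Int) + (pvScan (fun a => p < a) great_l.reverse : Int)

-- ===== PORT B =====
-- Source B's reset-counter fold: `c = c + 1 if q(v) else 0` over the whole list
def pvRun (q : Int → Bool) (xs : List Int) : Nat :=
  xs.foldl (fun c v => if q v then c + 1 else 0) 0

def check_liars_alt (great_l : List Int) (less_l : List Int) (p : Int) : Int :=
  -- `for v in reversed(less_l): below = below + 1 if v < p else 0`
  let below := pvRun (fun v => v < p) less_l.reverse
  -- `for v in great_l: above = above + 1 if p < v else 0`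
  let above := pvRun (fun v => p < v) great_l
  (below : Int) + (above : Int)

-- ===== PRECONDITION & SPEC =====
def Spec_check_liars (great_l : List Int) (less_l : List Int) (p : Int) (out : Int) : Prop := out = check_liars_alt great_l less_l p
instance (great_l : List Int) (less_l : List Int) (p : Int) (out : Int) : Decidable (Spec_check_liars great_l less_l p out) := by unfold Spec_check_liars; infer_instance

-- ===== CLAIM (what is proved, stated in full; the proofs are below) =====
def Claim_equal_check_liars : Prop := ∀ (great_l : List Int) (less_l : List Int) (p : Int), Dom_check_liars great_l less_l p → Spec_check_liars great_l less_l p (check_liars great_l less_l p)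

-- ===== LEMMAS AND PROOFS =====

-- the reset-counter fold over the reversed list computes A's early-exit scan count
theorem pvRun_reverse (q : Int → Bool) (xs : List Int) :
    pvRun q xs.reverse = pvScan q xs := by
  induction xs with
  | nil => rfl
  | cons a t ih =>
    rw [List.reverse_cons]
    simp only [pvRun, List.foldl_append, List.foldl_cons, List.foldl_nil] at *
    rw [pvScan, ih]

-- ===== VERDICT (by name: the statement is the Claim_ definition above) =====
theorem check_liars_spec : Claim_equal_check_liars := by
  intro g l p _
  unfold Spec_check_liars check_liars check_liars_alt
  have h1 : pvRun (fun v => v < p) l.reverse = pvScan (fun a => p > a) l :=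
    pvRun_reverse _ l
  have h2 : pvRun (fun v => p < v) g = pvScan (fun a => p < a) g.reverse := by
    rw [← List.reverse_reverse g]
    rw [pvRun_reverse, List.reverse_reverse]
  rw [h1, h2]
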